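-- pv_equiv track=rewrite | github.com/Rundll86/zhx-todo-list | engine/parser.py | isArgsMatch
-- ===== SOURCE A (Python) =====
-- def isPartValid(syntaxPart: str):
--     if syntaxPart.startswith("...") and len(syntaxPart) > 3:
--         return isPartValid(syntaxPart[3:])
--     if syntaxPart == "str" or syntaxPart == "number":
--         return True
--     return False
--
-- def isPartsValid(syntaxParts: list[str]):
--     for index in range(len(syntaxParts)):
--         part = syntaxParts[index]
--         if part.startswith("...") and index != len(syntaxParts) - 1:
--             return False
--         if not isPartValid(part):
--             return False
--     return True
--
-- def getRestType(syntax: str):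
--     if syntax.startswith("."):
--         return str(getRestType(syntax[1:]))
--     else:
--         return syntax
--
-- def isArgMatch(arg: str, syntax: str):
--     if isPartValid(syntax):
--         targetType = syntax
--         if syntax.startswith("..."):
--             targetType = getRestType(syntax)
--         if targetType == "str":
--             return True
--         if targetType == "number":
--             try:
--                 float(arg)
--                 return True
--             except ValueError:
--                 return False
--
-- def isArgsMatch(args: list[str], syntaxParts: list[str]):
--     if not isPartsValid(syntaxParts):
--         return False
--     if len(args) < len(syntaxParts):
--         return False
--     if len(syntaxParts) == 0 and len(args) > 0:
--         return False
--     for i in range(len(args)):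
--         arg = args[i]
--         part = syntaxParts[min(len(syntaxParts) - 1, i)]
--         if part.startswith("..."):
--             if not isArgMatch(arg, getRestType(part)):
--                 return False
--         else:
--             if not isArgMatch(arg, part):
--                 return False
--     return True
-- ===== SOURCE B (Python) =====
-- def _floatOk(s):
--     try:
--         float(s)
--         return True
--     except ValueError:
--         return False
--
--
-- def _resolvedTypes(syntaxParts):
--     """Resolve each part to its bare type ('str'/'number'); None if any part is
--     invalid (leading dots not a multiple of 3, wrong bare type, or a
--     '...'-prefixed part that is not last)."""
--     types = []
--     last = len(syntaxParts) - 1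
--     for i, part in enumerate(syntaxParts):
--         bare = part.lstrip(".")
--         dots = len(part) - len(bare)
--         if bare not in ("str", "number") or dots % 3 != 0:
--             return None
--         if dots and i != last:
--             return None
--         types.append(bare)
--     return types
--
--
-- def isArgsMatch(args, syntaxParts):
--     types = _resolvedTypes(syntaxParts)
--     if types is None:
--         return False
--     if len(args) < len(syntaxParts):
--         return False
--     if not types and args:
--         return False
--     k = len(types)
--     head_ok = all(t == "str" or _floatOk(a) for a, t in zip(args, types))
--     rest_ok = k == 0 or types[-1] == "str" or all(_floatOk(a) for a in args[k:])
--     return head_ok and rest_ok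
-- ===== Notes on version B (the rewrite author's own statement) =====
-- stated objective: alternative
-- what changed: B replaces A's recursive strip-3-dots validator, per-arg getRestType re-resolution and Option-returning isArgMatch dispatch by one pass that resolves each syntax part to its bare type via a leading-dot count (valid iff count % 3 == 0 and remainder is 'str'/'number'), then checks args by zipping against the resolved table and batch-checking the variadic tail against the last type.
import Mathlib
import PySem

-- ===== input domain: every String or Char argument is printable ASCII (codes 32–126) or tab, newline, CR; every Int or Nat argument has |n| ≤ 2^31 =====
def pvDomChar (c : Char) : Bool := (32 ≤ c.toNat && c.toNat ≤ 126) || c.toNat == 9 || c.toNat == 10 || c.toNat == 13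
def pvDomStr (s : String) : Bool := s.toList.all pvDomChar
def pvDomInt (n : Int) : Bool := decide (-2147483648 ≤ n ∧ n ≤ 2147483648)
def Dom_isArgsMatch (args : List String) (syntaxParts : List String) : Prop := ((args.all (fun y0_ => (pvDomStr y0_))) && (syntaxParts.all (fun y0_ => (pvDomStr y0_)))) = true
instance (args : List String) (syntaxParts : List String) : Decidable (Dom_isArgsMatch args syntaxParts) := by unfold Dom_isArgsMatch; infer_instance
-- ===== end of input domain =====

-- B resolves each syntax part once via a leading-dot count instead of A's recursive
-- strip-3-dots validator and per-argument re-resolution (alternative decomposition, same cost class).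

-- ===== PORT A =====

-- shared port of the built-in float(s) SUCCESS test (ValueError ⇔ false); exact on ASCII strings.
-- Python float(): strip whitespace, optional sign, 'inf'/'infinity'/'nan' (case-insensitive),
-- or digits with single underscores between digits, optional '.', optional exponent.
def pyFloatWS (c : Char) : Bool := c == ' ' || c == '\t' || c == '\n' || c == '\r' || c == Char.ofNat 11 || c == Char.ofNat 12

def pyIsDig (c : Char) : Bool := '0' ≤ c && c ≤ '9'

-- consume (['_'] digit | digit)* after a first digit; exact on ASCII
def pyDigsCont : List Char → List Char
  | a :: b :: r => if a == '_' && pyIsDig b then pyDigsCont r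
                   else if pyIsDig a then pyDigsCont (b :: r) else a :: b :: r
  | a :: r => if pyIsDig a then pyDigsCont r else a :: r
  | [] => []

-- consume digit (['_'] digit)* ; none if no leading digit
def pyDigs (cs : List Char) : Option (List Char) :=
  match cs with
  | c :: rest => if pyIsDig c then some (pyDigsCont rest) else none
  | [] => none

-- exponent part: empty, or e/E [sign] digits consuming everything
def pyExpo (cs : List Char) : Bool :=
  match cs with
  | [] => true
  | c :: r =>
    if c == 'e' || c == 'E' then
      let r2 := match r with
        | s :: t => if s == '+' || s == '-' then t else s :: t
        | [] => []
      match pyDigs r2 with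
      | some [] => true
      | _ => false
    else false

-- does float(s) succeed? (exact on the ASCII domain)
def pyFloatOk (cs0 : List Char) : Bool :=
  let cs1 := ((cs0.dropWhile pyFloatWS).reverse.dropWhile pyFloatWS).reverse
  let cs := match cs1 with
    | c :: r => if c == '+' || c == '-' then r else c :: r
    | [] => []
  let low := PySem.Chars.lower cs
  if low == "inf".toList || low == "infinity".toList || low == "nan".toList then true
  else
    match cs with
    | '.' :: r =>
      match pyDigs r with
      | some r2 => pyExpo r2
      | none => false
    | _ =>
      match pyDigs cs with
      | none => false
      | some r =>
        match r with
        | '.' :: r2 =>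
          match pyDigs r2 with
          | some r3 => pyExpo r3
          | none => pyExpo r2
        | _ => pyExpo r

-- syntaxPart.startswith("...")
def startsDots3 (p : List Char) : Bool :=
  match p with
  | a :: b :: c :: _ => a == '.' && b == '.' && c == '.'
  | _ => false

-- isPartValid: strip "..." while length > 3, then compare to "str"/"number"
def partValidA : List Char → Bool
  | a :: b :: c :: d :: r =>
    if a == '.' && b == '.' && c == '.' then partValidA (d :: r)
    else (a :: b :: c :: d :: r) == "str".toList || (a :: b :: c :: d :: r) == "number".toList
  | p => p == "str".toList || p == "number".toList

-- getRestType: strip leading '.' one at a time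
def getRestTypeA : List Char → List Char
  | a :: r => if a == '.' then getRestTypeA r else a :: r
  | [] => []

-- isArgMatch (returns None when the syntax is not a bare valid type → Option Bool)
def isArgMatchA (arg syn : List Char) : Option Bool :=
  if partValidA syn then
    let target := if startsDots3 syn then getRestTypeA syn else syn
    if target == "str".toList then some true
    else if target == "number".toList then some (pyFloatOk arg)
    else none
  else none

-- isPartsValid: indexed loop; index != len-1 ⇔ rest ≠ []
def partsValidA : List (List Char) → Bool
  | [] => true
  | p :: rest =>
    if startsDots3 p && !rest.isEmpty then false
    else if !partValidA p then false
    else partsValidA rest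

-- the for-i-in-range(len(args)) loop of isArgsMatch
def argsLoopA (ps : List (List Char)) (i : Nat) : List (List Char) → Bool
  | [] => true
  | a :: rest =>
    let part := ps.getD (min (ps.length - 1) i) []
    if startsDots3 part then
      if !(isArgMatchA a (getRestTypeA part) == some true) then false
      else argsLoopA ps (i + 1) rest
    else
      if !(isArgMatchA a part == some true) then false
      else argsLoopA ps (i + 1) rest

def isArgsMatch (args : List String) (syntaxParts : List String) : Bool :=
  let ps := syntaxParts.map String.toList
  if !partsValidA ps then false
  else if args.length < syntaxParts.length then false
  else if syntaxParts.length == 0 && decide (0 < args.length) then false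
  else argsLoopA ps 0 (args.map String.toList)

-- ===== PORT B =====

-- resolve every part to its bare type; none if some part is invalid
-- (leading-dot count not a multiple of 3, wrong bare type, or dotted part not last)
def typesB : List (List Char) → Option (List (List Char))
  | [] => some []
  | p :: rest =>
    let bare := p.dropWhile (fun c => c == '.')
    let dots := p.length - bare.length
    if !(bare == "str".toList || bare == "number".toList) || dots % 3 != 0 then none
    else if dots != 0 && !rest.isEmpty then none
    else (typesB rest).map (fun ts => bare :: ts)

def isArgsMatch_alt (args : List String) (syntaxParts : List String) : Bool :=
  match typesB (syntaxParts.map String.toList) with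
  | none => false
  | some types =>
    if args.length < syntaxParts.length then false
    else if types.isEmpty && !args.isEmpty then false
    else
      let as := args.map String.toList
      let k := types.length
      let headOk := (as.zip types).all (fun at_ => at_.2 == "str".toList || pyFloatOk at_.1)
      let restOk := k == 0 || types.getLastD [] == "str".toList || (as.drop k).all pyFloatOk
      headOk && restOk

-- ===== PRECONDITION & SPEC =====
def Spec_isArgsMatch (args : List String) (syntaxParts : List String) (out : Bool) : Prop := out = isArgsMatch_alt args syntaxParts
instance (args : List String) (syntaxParts : List String) (out : Bool) : Decidable (Spec_isArgsMatch args syntaxParts out) := by unfold Spec_isArgsMatch; infer_instance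

-- ===== CLAIM (what is proved, stated in full; the proofs are below) =====
def Claim_equal_isArgsMatch : Prop := ∀ (args : List String) (syntaxParts : List String), Dom_isArgsMatch args syntaxParts → Spec_isArgsMatch args syntaxParts (isArgsMatch args syntaxParts)

-- ===== LEMMAS AND PROOFS =====

def bareOf (p : List Char) : List Char := p.dropWhile (fun c => c == '.')

def validB (p : List Char) : Bool :=
  (bareOf p == "str".toList || bareOf p == "number".toList) && (p.length - (bareOf p).length) % 3 == 0

def gLoop (types : List (List Char)) (i : Nat) : List (List Char) → Bool
  | [] => true
  | a :: rest => ((types.getD (min (types.length - 1) i) []) == "str".toList || pyFloatOk a) && gLoop types (i + 1) rest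

theorem strL : "str".toList = ['s','t','r'] := rfl

theorem numL : "number".toList = ['n','u','m','b','e','r'] := rfl

theorem getRest_eq_bare (p : List Char) : getRestTypeA p = bareOf p := by
  induction p with
  | nil => simp [getRestTypeA, bareOf]
  | cons a r ih =>
    by_cases h : a = '.' <;> simp [getRestTypeA, bareOf, h, ih]

theorem partValidA_eq (p : List Char) : partValidA p = validB p := by
  induction p using partValidA.induct with
  | case1 a b c d r h ih =>
    simp only [Bool.and_eq_true, beq_iff_eq] at h
    obtain ⟨⟨ha, hb⟩, hc⟩ := h
    subst ha; subst hb; subst hc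
    rw [partValidA, if_pos (by simp), ih]
    have hb3 : bareOf ('.' :: '.' :: '.' :: d :: r) = bareOf (d :: r) := by simp [bareOf]
    have hle : (bareOf (d :: r)).length ≤ (d :: r).length := List.length_dropWhile_le _ _
    unfold validB
    rw [hb3]
    have hm : ((d :: r).length - (bareOf (d :: r)).length) % 3
        = (('.' :: '.' :: '.' :: d :: r).length - (bareOf (d :: r)).length) % 3 := by
      simp only [List.length_cons] at *; omega
    rw [hm]
  | case2 a b c d r h =>
    rw [partValidA, if_neg (by simpa using h)]
    simp only [Bool.and_eq_true, beq_iff_eq, not_and] at h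
    by_cases ha : a = '.'
    · by_cases hb : b = '.'
      · have hc : ¬ c = '.' := by simp [ha, hb] at h; exact h
        subst ha; subst hb
        simp [validB, bareOf, hc, strL, numL]
      · subst ha
        simp [validB, bareOf, hb, strL, numL]
    · simp [validB, bareOf, ha, strL, numL]
  | case3 p h =>
    rcases p with _|⟨a, _|⟨b, _|⟨c, t⟩⟩⟩
    · simp [partValidA, validB, bareOf]
    · by_cases ha : a = '.' <;>
        simp [partValidA, validB, bareOf, ha, strL, numL]
    · by_cases ha : a = '.' <;> by_cases hb : b = '.' <;>
        simp [partValidA, validB, bareOf, ha, hb, strL, numL]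
    · rcases t with _|⟨d, r⟩
      · by_cases ha : a = '.' <;> by_cases hb : b = '.' <;> by_cases hc : c = '.' <;>
          simp [partValidA, validB, bareOf, ha, hb, hc, strL, numL]
      · exact absurd rfl (h a b c d r)

theorem starts3_eq (p : List Char) (h3 : (p.length - (bareOf p).length) % 3 = 0) :
    startsDots3 p = decide (p.length ≠ (bareOf p).length) := by
  rcases p with _|⟨a, _|⟨b, _|⟨c, r⟩⟩⟩
  · simp [startsDots3, bareOf]
  · by_cases ha : a = '.' <;> simp [startsDots3, bareOf, ha] <;> simp [bareOf, ha] at h3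
  · by_cases ha : a = '.' <;> by_cases hb : b = '.' <;>
      simp [startsDots3, bareOf, ha, hb] <;> simp [bareOf, ha, hb] at h3 <;> omega
  · by_cases ha : a = '.' <;> by_cases hb : b = '.' <;> by_cases hc : c = '.' <;>
      simp [startsDots3, bareOf, ha, hb, hc] <;> simp [bareOf, ha, hb, hc] at h3 <;>
      (try omega) <;>
      · have hle := List.length_dropWhile_le (fun c : Char => c == '.') r
        omega

theorem typesB_eq (ps : List (List Char)) :
    typesB ps = if partsValidA ps then some (ps.map bareOf) else none := by
  induction ps with
  | nil => simp [typesB, partsValidA]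
  | cons p rest ih =>
    rw [typesB, partsValidA]
    by_cases hv : validB p = true
    · have hpa : partValidA p = true := (partValidA_eq p).trans hv
      have hcomp := hv
      unfold validB bareOf at hcomp
      rw [Bool.and_eq_true] at hcomp
      have h3 : ((p.length - (p.dropWhile (fun c => c == '.')).length) % 3 = 0) := by
        simpa using hcomp.2
      have hC1 : (!(p.dropWhile (fun c => c == '.') == "str".toList
            || p.dropWhile (fun c => c == '.') == "number".toList)
            || (p.length - (p.dropWhile (fun c => c == '.')).length) % 3 != 0) = false := by
        rw [hcomp.1]; simp [h3]
      rw [hC1]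
      have hs3 : (p.length - (p.dropWhile (fun c => c == '.')).length != 0) = startsDots3 p := by
        rw [starts3_eq p (by simpa [bareOf] using h3)]
        have hle := List.length_dropWhile_le (fun c : Char => c == '.') p
        by_cases h : p.length = (p.dropWhile (fun c => c == '.')).length
        · simp [bareOf, h]
        · have h0 : p.length - (p.dropWhile (fun c => c == '.')).length ≠ 0 := by omega
          simp [bareOf, h, h0]
      rw [hs3]
      cases hC2 : (startsDots3 p && !rest.isEmpty) with
      | true => simp
      | false =>
        simp only [Bool.false_eq_true, if_false, hpa, Bool.not_true, ih]
        by_cases hrest : partsValidA rest = true <;> simp [hrest, bareOf]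
    · have hpa : partValidA p = false := by
        rw [partValidA_eq p]
        exact Bool.not_eq_true _ |>.mp (by simpa using hv)
      have hC1 : (!(p.dropWhile (fun c => c == '.') == "str".toList
            || p.dropWhile (fun c => c == '.') == "number".toList)
            || (p.length - (p.dropWhile (fun c => c == '.')).length) % 3 != 0) = true := by
        have : validB p = false := Bool.not_eq_true _ |>.mp (by simpa using hv)
        unfold validB bareOf at this
        rw [Bool.and_eq_false_iff] at this
        rcases this with h | h
        · rw [h]; simp
        · simp [bne, h]
      rw [hC1]
      cases hC2 : (startsDots3 p && !rest.isEmpty) <;> simp [hpa]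

theorem partsValid_mem (ps : List (List Char)) (h : partsValidA ps = true)
    (q : List Char) (hq : q ∈ ps) : partValidA q = true := by
  induction ps with
  | nil => cases hq
  | cons p rest ih =>
    rw [partsValidA] at h
    by_cases h1 : (startsDots3 p && !rest.isEmpty) = true
    · rw [if_pos h1] at h; cases h
    · rw [if_neg h1] at h
      by_cases h2 : partValidA p = true
      · rw [h2] at h
        simp only [Bool.not_true, Bool.false_eq_true, if_false] at h
        rcases List.mem_cons.mp hq with rfl | hq
        · exact h2
        · exact ih h hq
      · rw [Bool.not_eq_true] at h2
        rw [h2] at h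
        simp at h

theorem isArgMatchA_bare (a p : List Char) (hv : validB p = true) :
    isArgMatchA a (if startsDots3 p then getRestTypeA p else p)
      = some ((bareOf p == "str".toList) || pyFloatOk a) := by
  have hcomp := hv
  unfold validB at hcomp
  rw [Bool.and_eq_true] at hcomp
  have hb := hcomp.1
  have h3 : ((p.length - (bareOf p).length) % 3 = 0) := by simpa using hcomp.2
  have key : ∀ q, q = "str".toList ∨ q = "number".toList →
      isArgMatchA a q = some ((q == "str".toList) || pyFloatOk a) := by
    intro q hq
    rcases hq with h | h <;> subst h <;>
      simp [isArgMatchA, partValidA, startsDots3, strL, numL]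
  rw [Bool.or_eq_true, beq_iff_eq, beq_iff_eq] at hb
  cases hs : startsDots3 p
  · have hlen : p.length = (bareOf p).length := by
      rw [starts3_eq p h3] at hs
      simpa using hs
    have hpb : p = bareOf p :=
      ((List.dropWhile_suffix _).eq_of_length hlen.symm).symm
    simp only [Bool.false_eq_true, if_false]
    have harg : isArgMatchA a p = isArgMatchA a (bareOf p) := by rw [← hpb]
    rw [harg]
    exact key _ hb
  · simp only [if_true]
    rw [getRest_eq_bare]
    exact key _ hb

theorem argsLoopA_eq (ps : List (List Char)) (hne : ps ≠ [])
    (hall : partsValidA ps = true) (as : List (List Char)) (i : Nat) :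
    argsLoopA ps i as = gLoop (ps.map bareOf) i as := by
  induction as generalizing i with
  | nil => rw [argsLoopA, gLoop]
  | cons a rest ih =>
    rw [argsLoopA, gLoop]
    have hlt : min (ps.length - 1) i < ps.length := by
      have : 0 < ps.length := List.length_pos_iff.mpr hne
      omega
    have hget : ps.getD (min (ps.length - 1) i) [] = ps[min (ps.length - 1) i] :=
      List.getD_eq_getElem ps [] hlt
    have hmem : ps[min (ps.length - 1) i] ∈ ps := List.getElem_mem hlt
    have hv : validB (ps.getD (min (ps.length - 1) i) []) = true := by
      rw [hget, ← partValidA_eq]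
      exact partsValid_mem ps hall _ hmem
    have hgetmap : (ps.map bareOf).getD (min ((ps.map bareOf).length - 1) i) []
        = bareOf (ps.getD (min (ps.length - 1) i) []) := by
      rw [List.length_map, hget, List.getD_eq_getElem _ [] (by simpa using hlt),
        List.getElem_map]
    rw [hgetmap]
    have hstep := isArgMatchA_bare a _ hv
    cases hs : startsDots3 (ps.getD (min (ps.length - 1) i) []) with
    | true =>
      rw [hs, if_pos rfl] at hstep
      simp only [hstep]
      cases hx : ((bareOf (ps.getD (min (ps.length - 1) i) []) == "str".toList) || pyFloatOk a) <;>
        simp [hx, ih]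
    | false =>
      rw [hs, if_neg (by simp)] at hstep
      simp only [hstep]
      cases hx : ((bareOf (ps.getD (min (ps.length - 1) i) []) == "str".toList) || pyFloatOk a) <;>
        simp [hx, ih]

theorem all_or_const (c : Bool) (f : List Char → Bool) (l : List (List Char)) :
    (l.all fun a => c || f a) = (c || l.all f) := by
  cases c <;> simp

theorem gLoop_zip (types : List (List Char)) (hne : types ≠ []) (as : List (List Char)) (i : Nat) :
    gLoop types i as
      = ((as.zip (types.drop i)).all (fun at_ => at_.2 == "str".toList || pyFloatOk at_.1)
        && ((as.drop (types.length - i)).all (fun a => types.getLastD [] == "str".toList || pyFloatOk a))) := by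
  induction as generalizing i with
  | nil => simp [gLoop]
  | cons a rest ih =>
    rw [gLoop]
    by_cases hi : i < types.length
    · have hdrop : types.drop i = types[i] :: types.drop (i + 1) :=
        List.drop_eq_getElem_cons hi
      have hmin : min (types.length - 1) i = i := by omega
      have hget : types.getD i [] = types[i] := List.getD_eq_getElem types [] hi
      have hsub : types.length - i = (types.length - (i + 1)) + 1 := by omega
      rw [hmin, hget, hsub, List.drop_succ_cons, ih, hdrop, List.zip_cons_cons, List.all_cons]
      simp [Bool.and_assoc]
    · have hdrop : types.drop i = [] := List.drop_eq_nil_of_le (by omega)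
      have hmin : min (types.length - 1) i = types.length - 1 := by omega
      have hgetlast : types.getD (types.length - 1) [] = types.getLastD [] := by
        have hlt : types.length - 1 < types.length := by
          have : 0 < types.length := List.length_pos_iff.mpr hne
          omega
        rw [List.getD_eq_getElem?_getD, List.getLastD_eq_getLast?, List.getLast?_eq_getElem?]
      have hsub : types.length - i = 0 := by omega
      have hsub2 : types.length - (i + 1) = 0 := by omega
      rw [hmin, hgetlast, hdrop, hsub, ih]
      rw [hsub2, List.drop_zero, List.drop_zero]
      have hdrop2 : types.drop (i + 1) = [] := List.drop_eq_nil_of_le (by omega)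
      rw [hdrop2]
      simp [List.all_cons]

-- ===== VERDICT (by name: the statement is the Claim_ definition above) =====
theorem isArgsMatch_spec : Claim_equal_isArgsMatch := by
  intro args parts _
  unfold Spec_isArgsMatch isArgsMatch isArgsMatch_alt
  rw [typesB_eq]
  by_cases hpv : partsValidA (parts.map String.toList) = true
  · simp only [hpv, if_pos, Bool.not_true, Bool.false_eq_true, if_false, if_true]
    by_cases hlen : args.length < parts.length
    · simp [hlen]
    · simp only [hlen, if_false]
      by_cases hps : parts = []
      · subst hps
        rcases args with _ | ⟨a, as⟩ <;> simp [argsLoopA]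
      · have hne : parts.map String.toList ≠ [] := by simpa using hps
        have hlen0 : (parts.length == 0) = false := by
          simp [List.length_eq_zero_iff, hps]
        have hne2 : (parts.map String.toList).map bareOf ≠ [] := by simpa using hps
        rw [argsLoopA_eq _ hne hpv, gLoop_zip _ hne2 _ 0]
        simp only [List.drop_zero, Nat.sub_zero]
        rw [all_or_const]
        simp [hps, hlen0]
  · have hpv' : partsValidA (parts.map String.toList) = false := by
      simpa using hpv
    simp only [hpv', Bool.not_false, if_true, Bool.false_eq_true, if_false]
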